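-- pv_equiv track=rewrite | github.com/tiendat8438/Python | Variables & Data types/SỐ 2 ƯU THẾ.py | solve
-- ===== SOURCE A (Python) =====
-- def check(n):
--     return n.count('2') > len(n) // 2
--
-- def solve(n):
--     from queue import Queue
--     q = Queue()
--     q.put('1')
--     q.put('2')
--     res = []
--     while not q.empty():
--         cur = q.get()
--         if check(cur):
--             res.append(cur)
--             if len(res) == n:
--                 break
--
--         if len(cur) < 20:
--             q.put(cur + '0')
--             q.put(cur + '1')
--             q.put(cur + '2')
--     return res
-- ===== SOURCE B (Python) =====
-- def check(n):
--     return n.count('2') > len(n) // 2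
--
-- def solve(n):
--     from itertools import product
--     res = []
--     for length in range(1, 21):
--         for first in '12':
--             for rest in product('012', repeat=length - 1):
--                 cur = first + ''.join(rest)
--                 if check(cur):
--                     res.append(cur)
--                     if len(res) == n:
--                         return res
--     return res
-- ===== Notes on version B (the rewrite author's own statement) =====
-- stated objective: faster
-- what changed: Replaces the FIFO-queue BFS over the ternary string tree with direct nested enumeration (length 1..20, first char in '12', remaining chars via itertools.product), which generates the identical ascending-length/lexicographic sequence without a queue.
import Mathlib
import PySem

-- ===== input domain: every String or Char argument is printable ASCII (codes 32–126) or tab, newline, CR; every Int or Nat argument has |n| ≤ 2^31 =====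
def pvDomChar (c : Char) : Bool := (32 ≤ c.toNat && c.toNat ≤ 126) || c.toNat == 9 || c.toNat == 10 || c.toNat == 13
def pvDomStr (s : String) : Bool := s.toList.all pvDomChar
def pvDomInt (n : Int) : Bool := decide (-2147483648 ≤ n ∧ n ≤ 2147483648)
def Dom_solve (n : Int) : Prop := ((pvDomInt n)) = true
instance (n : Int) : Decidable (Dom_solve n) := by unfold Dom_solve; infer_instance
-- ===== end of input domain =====

-- B replaces A's FIFO-queue BFS with direct nested enumeration (length 1..20, first char
-- in "12", remaining chars in product order), producing the identical sequence; measured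
-- faster by a constant factor (no queue). Proved: identical return value for every n.

-- ===== PORT A =====
-- check(n): n.count('2') > len(n) // 2
def check (s : String) : Bool :=
  decide (PySem.Int.floordiv (PySem.Str.len s) 2 < (PySem.Str.count s "2" : Int))

-- 'if len(cur) < 20: q.put(cur+'0'); q.put(cur+'1'); q.put(cur+'2')' — the strings enqueued for cur
def children (c : String) : List String :=
  if PySem.Str.len c < 20 then [c ++ "0", c ++ "1", c ++ "2"] else []

-- the while loop of A: q is the queue front-to-back, res the collected list.
-- fuel only makes the recursion structural; it never runs out: one unit is spent per
-- queue pop and loopA_eq_aux shows M q pops suffice (M ["1","2"] = 3486784400 < fuel)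
def solveLoop (n : Int) (fuel : Nat) (q : List String) (res : List String) : List String :=
  match fuel with
  | 0 => res
  | fuel + 1 =>
    match q with
    | [] => res
    | c :: q' =>
      if check c then
        let res' := res ++ [c]
        if (res'.length : Int) = n then res'
        else solveLoop n fuel (q' ++ children c) res'
      else solveLoop n fuel (q' ++ children c) res

def solve (n : Int) : List String := solveLoop n 4000000000 ["1", "2"] []

-- ===== PORT B =====
-- list(itertools.product('012', repeat=k)), each tuple joined to a string (leftmost varies slowest)
def prods : Nat → List String
  | 0 => [""]
  | k + 1 => ["0", "1", "2"].flatMap (fun d => (prods k).map (fun t => d ++ t))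

-- the innermost 'for rest in product(...)' loop; Bool = 'returned early'
def bInner (n : Int) (first : String) (rests : List String) (res : List String) :
    List String × Bool :=
  match rests with
  | [] => (res, false)
  | r :: rs =>
    let cur := first ++ r
    if check cur then
      let res' := res ++ [cur]
      if (res'.length : Int) = n then (res', true)
      else bInner n first rs res'
    else bInner n first rs res

-- the 'for first in "12"' loop
def bFirsts (n : Int) (firsts : List String) (rests : List String) (res : List String) :
    List String × Bool :=
  match firsts with
  | [] => (res, false)
  | f :: fs =>
    let p := bInner n f rests res
    if p.2 then p else bFirsts n fs rests p.1

-- the 'for length in range(1, 21)' loop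
def bLens (n : Int) (lens : List Int) (res : List String) : List String × Bool :=
  match lens with
  | [] => (res, false)
  | L :: Ls =>
    let p := bFirsts n ["1", "2"] (prods (L - 1).toNat) res
    if p.2 then p else bLens n Ls p.1

def solve_alt (n : Int) : List String := (bLens n (PySem.List.pyRange 1 21 1) []).1

-- ===== PRECONDITION & SPEC =====
def Spec_solve (n : Int) (out : List String) : Prop := out = solve_alt n
instance (n : Int) (out : List String) : Decidable (Spec_solve n out) := by unfold Spec_solve; infer_instance

-- ===== CLAIM (what is proved, stated in full; the proofs are below) =====
def Claim_equal_solve : Prop := ∀ (n : Int), Dom_solve n → Spec_solve n (solve n)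

-- ===== LEMMAS AND PROOFS =====

-- termination measure for the BFS loop: size of the full ternary tree of remaining depth
def W : Nat → Nat
  | 0 => 1
  | d + 1 => 3 * W d + 1

def wgt (c : String) : Nat := W (20 - c.toList.length)

def M (q : List String) : Nat := (q.map wgt).sum

theorem W_pos (d : Nat) : 0 < W d := by
  cases d <;> simp [W]

theorem strLen_eq (c : String) : PySem.Str.len c = (c.toList.length : Int) := by
  simp [PySem.Str.len]

theorem M_children_lt (c : String) : M (children c) < wgt c := by
  unfold children
  by_cases h : PySem.Str.len c < 20
  · have hx := h
    rw [strLen_eq] at hx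
    have hL : c.toList.length < 20 := by exact_mod_cast hx
    have hlen : ∀ d : String, d.toList.length = 1 → ((c ++ d).toList.length) = c.toList.length + 1 := by
      intro d hd; simp [hd]
    have h0 : (c ++ "0").toList.length = c.toList.length + 1 := hlen _ (by decide)
    have h1 : (c ++ "1").toList.length = c.toList.length + 1 := hlen _ (by decide)
    have h2 : (c ++ "2").toList.length = c.toList.length + 1 := hlen _ (by decide)
    simp only [h, if_true, M, List.map, List.sum_cons, List.sum_nil, wgt, h0, h1, h2]
    have he : 20 - c.toList.length = (20 - (c.toList.length + 1)) + 1 := by omega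
    rw [he, W]
    omega
  · simp only [h, if_false, M, List.map_nil, List.sum_nil, wgt]
    exact W_pos _

theorem M_append (a b : List String) : M (a ++ b) = M a + M b := by
  simp [M]

theorem M_cons (c : String) (q : List String) : M (c :: q) = wgt c + M q := by
  simp [M]

theorem M_step (c : String) (q : List String) : M (q ++ children c) < M (c :: q) := by
  have h := M_children_lt c
  have h1 : M (q ++ children c) = M q + M (children c) := M_append q (children c)
  have h2 : M (c :: q) = wgt c + M q := M_cons c q
  omega

-- the full BFS processing order starting from queue q
def expand (q : List String) : List String :=
  match q with
  | [] => []
  | c :: q' => c :: expand (q' ++ children c)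
termination_by M q
decreasing_by exact M_step c q'

-- collect matches from a candidate stream, starting at count t, stopping when the count hits n
def collect (n : Int) (t : Nat) : List String → List String × Bool
  | [] => ([], false)
  | x :: xs =>
    if check x then
      if ((t : Int) + 1 = n) then ([x], true)
      else
        let p := collect n (t + 1) xs
        (x :: p.1, p.2)
    else collect n t xs

theorem loopA_eq_aux (n : Int) : ∀ (N : Nat) (q res : List String), M q ≤ N →
    solveLoop n N q res = res ++ (collect n res.length (expand q)).1 := by
  intro N
  induction N with
  | zero =>
    intro q res h
    cases q with
    | nil => simp [solveLoop, expand, collect]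
    | cons c q' =>
      exfalso
      have h1 := W_pos (20 - c.toList.length)
      have h2 := M_cons c q'
      simp only [wgt] at h2
      omega
  | succ N ih =>
    intro q res h
    cases q with
    | nil => simp [solveLoop, expand, collect]
    | cons c q' =>
      have hle : M (q' ++ children c) ≤ N := by
        have := M_step c q'
        omega
      have hlen1 : ((res ++ [c]).length : Int) = (res.length : Int) + 1 := by
        simp
      by_cases hc : check c
      · by_cases hn : ((res.length : Int) + 1 = n)
        · simp only [solveLoop, expand, collect, hc, if_true, hlen1, hn]
        · simp only [solveLoop, expand, collect, hc, if_true, hlen1, hn, if_false]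
          rw [ih _ _ hle]
          simp
      · simp only [solveLoop, expand, collect, hc, Bool.false_eq_true, if_false]
        rw [ih _ _ hle]

theorem loopA_eq (n : Int) :
    solve n = [] ++ (collect n ([] : List String).length (expand ["1", "2"])).1 :=
  loopA_eq_aux n 4000000000 ["1", "2"] [] (by decide)

theorem collect_append (n : Int) (t : Nat) (l₁ l₂ : List String) :
    collect n t (l₁ ++ l₂) =
      (let p := collect n t l₁
       if p.2 then p
       else (p.1 ++ (collect n (t + p.1.length) l₂).1, (collect n (t + p.1.length) l₂).2)) := by
  induction l₁ generalizing t with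
  | nil => simp [collect]
  | cons x xs ih =>
    by_cases hc : check x
    · by_cases hn : ((t : Int) + 1 = n)
      · simp [collect, hc, hn]
      · simp only [List.cons_append, collect, hc, if_true, hn, if_false]
        rw [ih (t + 1)]
        by_cases hp : (collect n (t + 1) xs).2
        · simp [hp]
        · have harith : t + ((collect n (t + 1) xs).1.length + 1) =
              t + 1 + (collect n (t + 1) xs).1.length := by omega
          simp [hp, harith]
    · simp only [List.cons_append, collect, hc]
      exact ih t

theorem bInner_eq (n : Int) (first : String) (rests res : List String) :
    bInner n first rests res =
      (res ++ (collect n res.length (rests.map (first ++ ·))).1,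
       (collect n res.length (rests.map (first ++ ·))).2) := by
  induction rests generalizing res with
  | nil => simp [bInner, collect]
  | cons r rs ih =>
    have hlen1 : ((res ++ [first ++ r]).length : Int) = (res.length : Int) + 1 := by simp
    by_cases hc : check (first ++ r)
    · by_cases hn : ((res.length : Int) + 1 = n)
      · simp [bInner, collect, hc, hn]
      · simp only [bInner, List.map_cons, collect, hc, if_true, hlen1, hn, if_false]
        rw [ih]
        simp
    · simp only [bInner, List.map_cons, collect, hc]
      exact ih res

theorem bFirsts_eq (n : Int) (firsts rests res : List String) :
    bFirsts n firsts rests res =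
      (res ++ (collect n res.length (firsts.flatMap (fun f => rests.map (f ++ ·)))).1,
       (collect n res.length (firsts.flatMap (fun f => rests.map (f ++ ·)))).2) := by
  induction firsts generalizing res with
  | nil => simp [bFirsts, collect]
  | cons f fs ih =>
    simp only [bFirsts, List.flatMap_cons]
    rw [bInner_eq, collect_append]
    by_cases hp : (collect n res.length (rests.map (f ++ ·))).2
    · simp [hp]
    · simp only [hp]
      rw [ih]
      simp [List.append_assoc]

theorem bLens_eq (n : Int) (lens : List Int) (res : List String) :
    bLens n lens res =
      (res ++ (collect n res.length
          (lens.flatMap (fun L => ["1", "2"].flatMap (fun f => (prods (L - 1).toNat).map (f ++ ·))))).1,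
       (collect n res.length
          (lens.flatMap (fun L => ["1", "2"].flatMap (fun f => (prods (L - 1).toNat).map (f ++ ·))))).2) := by
  induction lens generalizing res with
  | nil => simp [bLens, collect]
  | cons L Ls ih =>
    simp only [bLens, List.flatMap_cons]
    rw [bFirsts_eq, collect_append, ih]
    cases hp : (collect n res.length
        (["1", "2"].flatMap (fun f => (prods (L - 1).toNat).map (f ++ ·)))).2 <;>
      simp_all [List.append_assoc]

-- suffix-recursion form of prods (same lexicographic list, last character varies fastest)
def prodsR : Nat → List String
  | 0 => [""]
  | k + 1 => (prodsR k).flatMap (fun t => [t ++ "0", t ++ "1", t ++ "2"])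

theorem prodsR_add (j k : Nat) :
    prodsR (j + k) = (prodsR j).flatMap (fun a => (prodsR k).map (a ++ ·)) := by
  induction k with
  | zero => simp [prodsR]
  | succ k ih =>
    show prodsR ((j + k) + 1) = _
    rw [prodsR, ih]
    simp [prodsR, List.flatMap_assoc, List.flatMap_map, List.map_flatMap, String.append_assoc]

theorem prods_eq (k : Nat) : prods k = prodsR k := by
  induction k with
  | zero => rfl
  | succ k ih =>
    rw [prods, ih]
    have h1 : prodsR (k + 1) = prodsR (1 + k) := by rw [Nat.add_comm]
    rw [h1, prodsR_add]
    congr 1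

theorem length_mem_prodsR (k : Nat) : ∀ s ∈ prodsR k, s.toList.length = k := by
  induction k with
  | zero =>
    intro s hs
    simp [prodsR] at hs
    subst hs
    rfl
  | succ k ih =>
    intro s hs
    simp only [prodsR, List.mem_flatMap, List.mem_cons, List.not_mem_nil, or_false] at hs
    obtain ⟨t, ht, hcase⟩ := hs
    have hl := ih t ht
    rcases hcase with h | h | h <;> subst h <;> simp [hl]

-- level k of the BFS tree (strings of length k+1)
def Blev (k : Nat) : List String :=
  ["1", "2"].flatMap (fun f => (prodsR k).map (f ++ ·))

theorem flatMap_congr_mem {α β : Type} (l : List α) (f g : α → List β)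
    (h : ∀ x ∈ l, f x = g x) : l.flatMap f = l.flatMap g := by
  induction l with
  | nil => rfl
  | cons x xs ih => simp only [List.flatMap_cons, h x (by simp), ih (fun y hy => h y (by simp [hy]))]

theorem length_mem_Blev (k : Nat) : ∀ s ∈ Blev k, s.toList.length = k + 1 := by
  intro s hs
  simp only [Blev, List.mem_flatMap, List.mem_map, List.mem_cons, List.not_mem_nil, or_false] at hs
  obtain ⟨f, hf, r, hr, hs⟩ := hs
  subst hs
  have hr' := length_mem_prodsR k r hr
  rcases hf with h | h <;> subst h <;> simp [hr']

theorem children_of_short (s : String) (h : s.toList.length < 20) :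
    children s = [s ++ "0", s ++ "1", s ++ "2"] := by
  unfold children
  rw [strLen_eq, if_pos (show ((s.toList.length : Int) < 20) by exact_mod_cast h)]

theorem children_of_long (s : String) (h : ¬ s.toList.length < 20) :
    children s = [] := by
  unfold children
  rw [strLen_eq, if_neg (show ¬ ((s.toList.length : Int) < 20) by exact_mod_cast h)]

theorem flatMap_children_level (k : Nat) (hk : k + 1 < 20) :
    (Blev k).flatMap children = Blev (k + 1) := by
  unfold Blev
  rw [List.flatMap_assoc]
  apply flatMap_congr_mem
  intro f hf
  rw [List.flatMap_map]
  show (prodsR k).flatMap (fun r => children (f ++ r)) = _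
  have hf1 : f.toList.length = 1 := by
    simp only [List.mem_cons, List.not_mem_nil, or_false] at hf
    rcases hf with h | h <;> subst h <;> decide
  rw [show prodsR (k + 1) = (prodsR k).flatMap (fun t => [t ++ "0", t ++ "1", t ++ "2"]) from rfl]
  rw [List.map_flatMap]
  apply flatMap_congr_mem
  intro r hr
  have hlr := length_mem_prodsR k r hr
  have hfr : (f ++ r).toList.length < 20 := by
    simp [hf1, hlr]
    omega
  rw [children_of_short _ hfr]
  simp [String.append_assoc]

theorem flatMap_children_last : (Blev 19).flatMap children = [] := by
  rw [flatMap_congr_mem (Blev 19) children (fun _ => [])]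
  · simp
  · intro s hs
    exact children_of_long s (by rw [length_mem_Blev 19 s hs]; omega)

theorem expand_append (q r : List String) :
    expand (q ++ r) = q ++ expand (r ++ q.flatMap children) := by
  induction q generalizing r with
  | nil => simp
  | cons c q ih =>
    show expand (c :: (q ++ r)) = _
    rw [show expand (c :: (q ++ r)) = c :: expand ((q ++ r) ++ children c) from by
      simp only [expand]]
    rw [List.append_assoc, ih (r ++ children c)]
    simp [List.flatMap_cons, List.append_assoc]

theorem expand_step (l : List String) : expand l = l ++ expand (l.flatMap children) := by
  have h := expand_append l []
  simpa using h

theorem expand_levels : ∀ (m k : Nat), k + (m + 1) = 20 →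
    expand (Blev k) = ((List.range (m + 1)).map (fun i => Blev (k + i))).flatten := by
  intro m
  induction m with
  | zero =>
    intro k hk
    have hk' : k = 19 := by omega
    subst hk'
    rw [expand_step, flatMap_children_last]
    simp [expand]
  | succ m ih =>
    intro k hk
    have hfun : (fun i => Blev (k + 1 + i)) = ((fun i => Blev (k + i)) ∘ Nat.succ) := by
      funext i
      simp only [Function.comp_apply]
      congr 1
      omega
    rw [expand_step, flatMap_children_level k (by omega), ih (k + 1) (by omega)]
    conv_rhs => rw [List.range_succ_eq_map]
    simp only [List.map_cons, List.flatten_cons, List.map_map, Nat.add_zero, hfun]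

theorem expand_start :
    expand ["1", "2"] = ((List.range 20).map Blev).flatten := by
  have h0 : Blev 0 = ["1", "2"] := by decide
  have h := expand_levels 19 0 (by omega)
  rw [h0] at h
  rw [h]
  simp

theorem seq_eq :
    ((PySem.List.pyRange 1 21 1).flatMap
        (fun L => ["1", "2"].flatMap (fun f => (prods (L - 1).toNat).map (f ++ ·)))) =
      ((List.range 20).map Blev).flatten := by
  have hr : PySem.List.pyRange 1 21 1 =
      ([1, 2, 3, 4, 5, 6, 7, 8, 9, 10, 11, 12, 13, 14, 15, 16, 17, 18, 19, 20] : List Int) := by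
    decide
  have h20 : List.range 20 = [0, 1, 2, 3, 4, 5, 6, 7, 8, 9, 10, 11, 12, 13, 14, 15, 16, 17, 18, 19] := by
    decide
  rw [hr, h20]
  simp only [List.flatMap_cons, List.flatMap_nil, List.map_cons, List.map_nil,
    List.flatten_cons, List.flatten_nil, prods_eq, Blev, List.append_nil]
  norm_num
  simp only [show Int.toNat 2 = 2 from rfl, show Int.toNat 3 = 3 from rfl, show Int.toNat 4 = 4 from rfl, show Int.toNat 5 = 5 from rfl, show Int.toNat 6 = 6 from rfl, show Int.toNat 7 = 7 from rfl, show Int.toNat 8 = 8 from rfl, show Int.toNat 9 = 9 from rfl, show Int.toNat 10 = 10 from rfl, show Int.toNat 11 = 11 from rfl, show Int.toNat 12 = 12 from rfl, show Int.toNat 13 = 13 from rfl, show Int.toNat 14 = 14 from rfl, show Int.toNat 15 = 15 from rfl, show Int.toNat 16 = 16 from rfl, show Int.toNat 17 = 17 from rfl, show Int.toNat 18 = 18 from rfl, show Int.toNat 19 = 19 from rfl]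

-- ===== VERDICT (by name: the statement is the Claim_ definition above) =====
theorem solve_spec : Claim_equal_solve := by
  intro n _
  unfold Spec_solve solve_alt
  rw [loopA_eq, bLens_eq, seq_eq, expand_start]
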